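-- pv_equiv track=rewrite | github.com/fhclk/ecgs_collection | util/util.py | intToHexListWithLen
-- ===== SOURCE A (Python) =====
-- def intToHexListWithLen(value, length):
--     result = []
--     while value > 0:
--         n = value & 0xff
--         result.insert(0,n)
--         value = value >> 8
--     if length < len(result):
--         return result[(len(result) - length):]
--     else:
--         num = length - len(result)
--         while num > 0:
--             result.insert(0,0x00)
--             num -= 1
--         return result
-- ===== SOURCE B (Python) =====
-- def intToHexListWithLen(value, length):
--     # One pass over the fixed output slots: slot i holds byte (length-1-i) of the
--     # value (negatives are treated as 0, as in A's `while value > 0` loop).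
--     v = 0 if value < 0 else value
--     return [(v >> (8 * (length - 1 - i))) & 0xFF for i in range(length)]
-- ===== Notes on version B (the rewrite author's own statement) =====
-- stated objective: simpler
-- what changed: B computes each of the `length` output slots directly as (value >> 8*(length-1-i)) & 0xff in one range comprehension (negatives treated as 0), replacing A's extract-significant-bytes loop (built with quadratic result.insert(0, n)) followed by a separate pad-or-truncate branch.
import Mathlib
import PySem

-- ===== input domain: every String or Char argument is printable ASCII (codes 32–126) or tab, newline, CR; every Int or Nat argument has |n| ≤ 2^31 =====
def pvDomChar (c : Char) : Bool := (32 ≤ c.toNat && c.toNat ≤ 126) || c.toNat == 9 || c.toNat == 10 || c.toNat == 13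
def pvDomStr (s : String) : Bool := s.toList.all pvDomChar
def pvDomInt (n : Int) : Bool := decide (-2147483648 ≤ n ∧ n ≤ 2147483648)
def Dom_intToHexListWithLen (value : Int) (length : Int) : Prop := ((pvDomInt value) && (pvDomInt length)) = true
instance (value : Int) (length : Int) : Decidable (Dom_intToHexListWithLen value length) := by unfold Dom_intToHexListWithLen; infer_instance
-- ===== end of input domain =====

-- B fills the `length` output slots in one pass (each slot one shift-and-mask),
-- instead of A's extract-significant-bytes-then-pad-or-truncate; objective: simpler.

-- ===== PORT A =====
-- `while value > 0: n = value & 0xff; result.insert(0, n); value = value >> 8`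
def pvALoop (value : Int) (result : List Int) : List Int :=
  if h : 0 < value then
    pvALoop (value >>> (8 : Nat)) (PySem.Int.band value 255 :: result)
  else result
termination_by value.toNat
decreasing_by
  have : value >>> (8 : Nat) = value / 256 := by
    rw [Int.shiftRight_eq_div_pow]; norm_num
  omega

-- `while num > 0: result.insert(0, 0x00); num -= 1`
def pvPadLoop (num : Int) (result : List Int) : List Int :=
  if 0 < num then pvPadLoop (num - 1) (0 :: result) else result
termination_by num.toNat

def intToHexListWithLen (value : Int) (length : Int) : List Int :=
  -- result = pvALoop value []
  if length < ((pvALoop value []).length : Int) then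
    -- result[(len(result) - length):]
    PySem.List.slice (pvALoop value []) (some (((pvALoop value []).length : Int) - length)) none
  else
    pvPadLoop (length - ((pvALoop value []).length : Int)) (pvALoop value [])

-- ===== PORT B =====
def intToHexListWithLen_alt (value : Int) (length : Int) : List Int :=
  -- v = 0 if value < 0 else value; [(v >> (8*(length-1-i))) & 0xff for i in range(length)]
  -- (the shift amount is ≥ 0 for every i in range(length), so `.toNat` is exact there)
  (PySem.List.pyRange 0 length 1).map
    (fun i => PySem.Int.band ((if value < 0 then 0 else value) >>> (8 * (length - 1 - i)).toNat) 255)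

-- ===== PRECONDITION & SPEC =====
def Spec_intToHexListWithLen (value : Int) (length : Int) (out : List Int) : Prop := out = intToHexListWithLen_alt value length
instance (value : Int) (length : Int) (out : List Int) : Decidable (Spec_intToHexListWithLen value length out) := by unfold Spec_intToHexListWithLen; infer_instance

-- ===== CLAIM (what is proved, stated in full; the proofs are below) =====
def Claim_equal_intToHexListWithLen : Prop := ∀ (value : Int) (length : Int), Dom_intToHexListWithLen value length → Spec_intToHexListWithLen value length (intToHexListWithLen value length)

-- ===== LEMMAS AND PROOFS =====

theorem pvShift8_toNat_lt (v : Int) (h : 0 < v) : (v >>> (8 : Nat)).toNat < v.toNat := by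
  rw [Int.shiftRight_eq_div_pow]; norm_num; omega

-- induction principle following pvALoop's recursion
theorem pvALoop_ind (P : Int → Prop)
    (h1 : ∀ v : Int, 0 < v → P (v >>> (8 : Nat)) → P v)
    (h2 : ∀ v : Int, ¬ 0 < v → P v) : ∀ v : Int, P v := by
  have key : ∀ (n : Nat) (v : Int), v.toNat = n → P v := by
    intro n
    induction n using Nat.strong_induction_on with
    | _ n ih =>
      intro v hv
      by_cases h : 0 < v
      · exact h1 v h (ih (v >>> (8 : Nat)).toNat (by have := pvShift8_toNat_lt v h; omega) _ rfl)
      · exact h2 v h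
  exact fun v => key v.toNat v rfl

-- big-endian list of the low n bytes of v, in the ports' shift-and-mask vocabulary
def pvBytesBE (v : Int) : Nat → List Int
  | 0 => []
  | n + 1 => pvBytesBE (v >>> (8 : Nat)) n ++ [PySem.Int.band v 255]

theorem pvBytesBE_length (v : Int) (n : Nat) : (pvBytesBE v n).length = n := by
  induction n generalizing v with
  | zero => rfl
  | succ n ih => simp [pvBytesBE, ih]

theorem pvShift_shift (v : Int) (a b : Nat) : v >>> a >>> b = v >>> (a + b) := by
  simp [Int.shiftRight_eq_div_pow, Int.ediv_ediv_eq_ediv_mul, pow_add]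

theorem pvBytesBE_cons (v : Int) (n : Nat) :
    pvBytesBE v (n + 1) = PySem.Int.band (v >>> (8 * n)) 255 :: pvBytesBE v n := by
  induction n generalizing v with
  | zero => simp [pvBytesBE]
  | succ n ih =>
    have h1 : pvBytesBE v (n + 2) = pvBytesBE (v >>> (8 : Nat)) (n + 1) ++ [PySem.Int.band v 255] := rfl
    rw [h1, ih, pvShift_shift]
    have h2 : 8 + 8 * n = 8 * (n + 1) := by ring
    rw [h2]
    rfl

theorem pvBytesBE_pad (v : Int) (k n : Nat) (hk : v >>> (8 * k) = 0) (hn : k ≤ n) :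
    pvBytesBE v n = List.replicate (n - k) 0 ++ pvBytesBE v k := by
  induction n with
  | zero => have : k = 0 := by omega
            subst this; simp
  | succ n ih =>
    rcases Nat.lt_or_ge k (n + 1) with h | h
    · have hkn : k ≤ n := by omega
      have hz : v >>> (8 * n) = 0 := by
        have h3 : v >>> (8 * n) = v >>> (8 * k) >>> (8 * (n - k)) := by
          rw [pvShift_shift]; congr 1; omega
        rw [h3, hk]
        simp [Int.shiftRight_eq_div_pow]
      rw [pvBytesBE_cons, hz, ih hkn]
      have h4 : n + 1 - k = (n - k) + 1 := by omega
      rw [h4, List.replicate_succ]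
      rfl
    · have : k = n + 1 := by omega
      subst this
      simp

theorem pvBytesBE_drop (v : Int) (n m : Nat) (h : m ≤ n) :
    (pvBytesBE v n).drop (n - m) = pvBytesBE v m := by
  induction n with
  | zero => have : m = 0 := by omega
            subst this; simp [pvBytesBE]
  | succ n ih =>
    rcases Nat.lt_or_ge m (n + 1) with hlt | hge
    · have hm : m ≤ n := by omega
      rw [pvBytesBE_cons]
      have h5 : n + 1 - m = (n - m) + 1 := by omega
      rw [h5, List.drop_succ_cons, ih hm]
    · have : m = n + 1 := by omega
      subst this
      simp

theorem pvALoop_append (v : Int) : ∀ acc : List Int, pvALoop v acc = pvALoop v [] ++ acc := by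
  induction v using pvALoop_ind with
  | h1 v h ih =>
    intro acc
    have e : ∀ a : List Int, pvALoop v a = pvALoop (v >>> (8 : Nat)) [] ++ (PySem.Int.band v 255 :: a) := by
      intro a
      rw [pvALoop, dif_pos h, ih]
    rw [e acc, e []]
    simp
  | h2 v h =>
    intro acc
    rw [pvALoop, dif_neg h, pvALoop, dif_neg h]
    simp

theorem pvALoop_eq_bytesBE (v : Int) :
    pvALoop v [] = pvBytesBE v (pvALoop v []).length := by
  induction v using pvALoop_ind with
  | h1 v h ih =>
    rw [pvALoop, dif_pos h, pvALoop_append]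
    have hlen : (pvALoop (v >>> (8 : Nat)) [] ++ [PySem.Int.band v 255]).length
        = (pvALoop (v >>> (8 : Nat)) []).length + 1 := by simp
    rw [hlen, pvBytesBE, ← ih]
  | h2 v h => rw [pvALoop, dif_neg h]; rfl

theorem pvALoop_high_zero (v : Int) : 0 ≤ v → v >>> (8 * (pvALoop v []).length) = 0 := by
  induction v using pvALoop_ind with
  | h1 v h ih =>
    intro _
    have hv8 : 0 ≤ v >>> (8 : Nat) := by
      rw [Int.shiftRight_eq_div_pow]
      positivity
    have ih' := ih hv8
    rw [pvALoop, dif_pos h, pvALoop_append]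
    have hlen : (pvALoop (v >>> (8 : Nat)) [] ++ [PySem.Int.band v 255]).length
        = (pvALoop (v >>> (8 : Nat)) []).length + 1 := by simp
    rw [hlen]
    have h6 : 8 * ((pvALoop (v >>> (8 : Nat)) []).length + 1)
        = 8 + 8 * (pvALoop (v >>> (8 : Nat)) []).length := by ring
    rw [h6, ← pvShift_shift, ih']
  | h2 v h =>
    intro hv
    have : v = 0 := by omega
    subst this
    rw [pvALoop, dif_neg h]
    decide

theorem pvPadLoop_eq (num : Int) (r : List Int) :
    pvPadLoop num r = List.replicate num.toNat 0 ++ r := by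
  induction hn : num.toNat generalizing num r with
  | zero =>
    rw [pvPadLoop, if_neg (by omega)]
    simp
  | succ n ih =>
    rw [pvPadLoop, if_pos (by omega), ih (num - 1) (0 :: r) (by omega)]
    simp [List.replicate_succ', List.append_assoc]

theorem pvAlt_eq_bytesBE (v : Int) (n : Nat) :
    (PySem.List.pyRange 0 (n : Int) 1).map
      (fun i => PySem.Int.band (v >>> (8 * ((n : Int) - 1 - i)).toNat) 255)
    = pvBytesBE v n := by
  induction n generalizing v with
  | zero => simp [PySem.List.pyRange_one_eq_nil, pvBytesBE]
  | succ n ih =>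
    have hsplit : PySem.List.pyRange 0 ((n : Int) + 1)
        = PySem.List.pyRange 0 (n : Int) ++ [(n : Int)] :=
      PySem.List.pyRange_one_succ_right (by positivity)
    push_cast
    rw [hsplit, List.map_append]
    have hpre : (PySem.List.pyRange 0 (n : Int)).map
        (fun i => PySem.Int.band (v >>> (8 * ((n : Int) + 1 - 1 - i)).toNat) 255)
        = (PySem.List.pyRange 0 (n : Int)).map
        (fun i => PySem.Int.band ((v >>> (8 : Nat)) >>> (8 * ((n : Int) - 1 - i)).toNat) 255) := by
      apply List.map_congr_left
      intro i hi
      rw [PySem.List.mem_pyRange_one] at hi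
      rw [pvShift_shift]
      congr 2
      omega
    rw [hpre, ih (v >>> (8 : Nat))]
    have hlast : ((n : Int) + 1 - 1 - (n : Int)) = 0 := by ring
    simp only [List.map_cons, List.map_nil, hlast]
    norm_num
    rfl

theorem pvAlt_char (value L : Int) (hL : 0 ≤ L) :
    intToHexListWithLen_alt value L = pvBytesBE (if value < 0 then 0 else value) L.toNat := by
  obtain ⟨n, rfl⟩ : ∃ n : Nat, L = (n : Int) := ⟨L.toNat, by omega⟩
  unfold intToHexListWithLen_alt
  rw [pvAlt_eq_bytesBE]
  simp

theorem pvAlt_neg (value L : Int) (hL : L < 0) : intToHexListWithLen_alt value L = [] := by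
  unfold intToHexListWithLen_alt
  rw [PySem.List.pyRange_one_eq_nil (by omega)]
  rfl

-- ===== VERDICT (by name: the statement is the Claim_ definition above) =====
theorem intToHexListWithLen_spec : Claim_equal_intToHexListWithLen := by
  intro value length _
  unfold Spec_intToHexListWithLen intToHexListWithLen
  have hAw : pvALoop value [] = pvALoop (if value < 0 then 0 else value) [] := by
    rcases lt_or_ge value 0 with h | h
    · rw [if_pos h, pvALoop, dif_neg (by omega), pvALoop, dif_neg (by omega)]
    · rw [if_neg (by omega)]
  set w : Int := if value < 0 then 0 else value with hw
  have hw0 : 0 ≤ w := by rw [hw]; split <;> omega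
  rw [hAw]
  have hdig : pvALoop w [] = pvBytesBE w (pvALoop w []).length := pvALoop_eq_bytesBE w
  have hhigh : w >>> (8 * (pvALoop w []).length) = 0 := pvALoop_high_zero w hw0
  rcases lt_or_ge length ((pvALoop w []).length : Int) with hlt | hge
  · -- truncation branch
    rw [if_pos hlt, PySem.List.slice_from (pvALoop w []) (a := ((pvALoop w []).length : Int) - length) (by omega)]
    rcases le_or_gt 0 length with hL | hL
    · rw [pvAlt_char value length hL, ← hw]
      have hmn : length.toNat ≤ (pvALoop w []).length := by omega
      have harg : (((pvALoop w []).length : Int) - length).toNat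
          = (pvALoop w []).length - length.toNat := by omega
      rw [harg]
      conv_lhs => rw [hdig]
      rw [pvBytesBE_length]
      exact pvBytesBE_drop w (pvALoop w []).length length.toNat hmn
    · rw [pvAlt_neg value length hL, hdig,
          List.drop_eq_nil_of_le (by rw [pvBytesBE_length]; omega)]
  · -- padding branch
    rw [if_neg (by omega), pvPadLoop_eq]
    have hL : 0 ≤ length := by omega
    rw [pvAlt_char value length hL, ← hw]
    conv_lhs => rw [hdig]
    rw [pvBytesBE_pad w (pvALoop w []).length length.toNat hhigh (by omega)]
    rw [pvBytesBE_length]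
    have harg2 : (length - ((pvALoop w []).length : Int)).toNat
        = length.toNat - (pvALoop w []).length := by omega
    rw [harg2]
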